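-- pv_equiv track=rewrite | github.com/isha-naru/braingu-toy-problems | src/2021/june/1/roman_numeral_reduction.py | roman_numeral_reduction
-- ===== SOURCE A (Python) =====
-- def roman_numeral_reduction(str):
--   roman = {'I':1,'V':5,'X':10,'L':50,'C':100,'D':500,'M':1000,'IV':4,'IX':9,'XL':40,'XC':90,'CD':400,'CM':900}
--   i = 0
--   num = 0
--   while i < len(str):
--     if i+1<len(str) and str[i:i+2] in roman:
--         num+=roman[str[i:i+2]]
--         i+=2
--     else:
--         num+=roman[str[i]]
--         i+=1
--   integer = int(num)
--   val = [
--     1000, 900, 500, 400,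
--     100, 90, 50, 40,
--     10, 9, 5, 4,
--     1
--   ]
--   syb = [
--     "M", "CM", "D", "CD",
--     "C", "XC", "L", "XL",
--     "X", "IX", "V", "IV",
--     "I"
--   ]
--   roman_num = ''
--   i = 0
--   while  num > 0:
--     for _ in range(num // val[i]):
--       roman_num += syb[i]
--       num -= val[i]
--     i += 1
--   return roman_num
-- ===== SOURCE B (Python) =====
-- def roman_numeral_reduction(str):
--   pairs = {'IV': 4, 'IX': 9, 'XL': 40, 'XC': 90, 'CD': 400, 'CM': 900}
--   ones = {'I': 1, 'V': 5, 'X': 10, 'L': 50, 'C': 100, 'D': 500, 'M': 1000}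
--   n = 0
--   i = 0
--   while i < len(str):
--     if str[i:i+2] in pairs:
--       n += pairs[str[i:i+2]]
--       i += 2
--     else:
--       n += ones[str[i]]
--       i += 1
--   units = ['', 'I', 'II', 'III', 'IV', 'V', 'VI', 'VII', 'VIII', 'IX']
--   tens = ['', 'X', 'XX', 'XXX', 'XL', 'L', 'LX', 'LXX', 'LXXX', 'XC']
--   hundreds = ['', 'C', 'CC', 'CCC', 'CD', 'D', 'DC', 'DCC', 'DCCC', 'CM']
--   return 'M' * (n // 1000) + hundreds[n // 100 % 10] + tens[n // 10 % 10] + units[n % 10]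
-- ===== Notes on version B (the rewrite author's own statement) =====
-- stated objective: idiomatic
-- what changed: The encode phase no longer runs A's greedy while/for repeated-subtraction over the 13-entry value table: B indexes precomputed per-decimal-digit tables (units/tens/hundreds) and emits 'M'*(n//1000); the parse keeps A's two-char-first scan but with separate pair/single dicts.
import Mathlib
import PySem

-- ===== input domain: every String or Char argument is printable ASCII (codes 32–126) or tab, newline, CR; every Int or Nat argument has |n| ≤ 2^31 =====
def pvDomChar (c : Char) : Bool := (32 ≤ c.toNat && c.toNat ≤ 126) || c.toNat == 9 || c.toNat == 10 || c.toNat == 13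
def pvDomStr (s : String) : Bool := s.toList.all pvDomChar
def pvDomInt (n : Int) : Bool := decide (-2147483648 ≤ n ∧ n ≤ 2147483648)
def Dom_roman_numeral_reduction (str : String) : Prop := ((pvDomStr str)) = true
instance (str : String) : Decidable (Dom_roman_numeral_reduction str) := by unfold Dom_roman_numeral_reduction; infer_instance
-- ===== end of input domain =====

-- B replaces A's greedy repeated-subtraction encode loop by per-decimal-digit tables (same parse behaviour).

-- ===== PORT A =====
-- A's single dict, in A's insertion order.
def pvRomanA : PySem.Dict String Int :=
  PySem.Dict.ofList [("I",1),("V",5),("X",10),("L",50),("C",100),("D",500),("M",1000),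
                     ("IV",4),("IX",9),("XL",40),("XC",90),("CD",400),("CM",900)]

-- A's parse while-loop, structural recursion on the remaining characters (i advances by 1 or 2).
-- A's KeyError on a character outside the dict is outside Pre_; getD 0 stands in for the raise there.
def pvParseA : List Char → Int → Int
  | [], num => num
  | [c], num => num + (pvRomanA.get? (String.ofList [c])).getD 0
  | a :: b :: rest, num =>
    if (pvRomanA.get? (String.ofList [a, b])).isSome then
      pvParseA rest (num + (pvRomanA.get? (String.ofList [a, b])).getD 0)
    else
      pvParseA (b :: rest) (num + (pvRomanA.get? (String.ofList [a])).getD 0)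

def pvValSybA : List (Int × String) :=
  [(1000,"M"),(900,"CM"),(500,"D"),(400,"CD"),(100,"C"),(90,"XC"),(50,"L"),(40,"XL"),
   (10,"X"),(9,"IX"),(5,"V"),(4,"IV"),(1,"I")]

-- the inner 'for _ in range(num // val[i])': append syb and subtract val, k times.
def pvInnerA (syb : String) (v : Int) : Nat → Int → String → Int × String
  | 0, num, acc => (num, acc)
  | k + 1, num, acc => pvInnerA syb v k (num - v) (acc ++ syb)

-- the outer 'while num > 0' with i walking the table; the empty-list case is a totality
-- guard only (A's num reaches 0 at val = 1 at the latest, so i never runs past the table).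
def pvEncodeA : List (Int × String) → Int → String → String
  | [], _, acc => acc
  | (v, s) :: rest, num, acc =>
    if num > 0 then
      let r := pvInnerA s v (PySem.Int.floordiv num v).toNat num acc
      pvEncodeA rest r.1 r.2
    else acc

def roman_numeral_reduction (str : String) : String :=
  pvEncodeA pvValSybA (pvParseA str.toList 0) ""

-- ===== PORT B =====
def pvPairsB : PySem.Dict String Int :=
  PySem.Dict.ofList [("IV",4),("IX",9),("XL",40),("XC",90),("CD",400),("CM",900)]

def pvOnesB : PySem.Dict String Int :=
  PySem.Dict.ofList [("I",1),("V",5),("X",10),("L",50),("C",100),("D",500),("M",1000)]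

-- B's parse while-loop (pairs-first lookup in the two dicts); KeyError likewise outside Pre_.
def pvParseB : List Char → Int → Int
  | [], n => n
  | [c], n => n + (pvOnesB.get? (String.ofList [c])).getD 0
  | a :: b :: rest, n =>
    if (pvPairsB.get? (String.ofList [a, b])).isSome then
      pvParseB rest (n + (pvPairsB.get? (String.ofList [a, b])).getD 0)
    else
      pvParseB (b :: rest) (n + (pvOnesB.get? (String.ofList [a])).getD 0)

def pvUnitsB : List String := ["","I","II","III","IV","V","VI","VII","VIII","IX"]
def pvTensB : List String := ["","X","XX","XXX","XL","L","LX","LXX","LXXX","XC"]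
def pvHundredsB : List String := ["","C","CC","CCC","CD","D","DC","DCC","DCCC","CM"]

-- 'M' * (n // 1000): string repetition (exact for the nonnegative n the parse produces).
def pvMRep (k : Int) : String := String.ofList (PySem.List.pyRepeat ['M'] k)

def roman_numeral_reduction_alt (str : String) : String :=
  let n := pvParseB str.toList 0
  pvMRep (PySem.Int.floordiv n 1000)
    ++ (pvHundredsB.getD (PySem.Int.mod (PySem.Int.floordiv n 100) 10).toNat "")
    ++ (pvTensB.getD (PySem.Int.mod (PySem.Int.floordiv n 10) 10).toNat "")
    ++ (pvUnitsB.getD (PySem.Int.mod n 10).toNat "")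

-- ===== PRECONDITION & SPEC =====
-- Pre_ excludes exactly the strings containing a character outside 'IVXLCDM', on which A's
-- single-character dict lookup raises KeyError (B raises KeyError there too).
def Pre_roman_numeral_reduction (str : String) : Prop :=
  (str.toList.all (fun c => c ∈ (['I','V','X','L','C','D','M'] : List Char))) = true
instance (str : String) : Decidable (Pre_roman_numeral_reduction str) := by
  unfold Pre_roman_numeral_reduction; infer_instance

def pvWitness_roman_numeral_reduction : String := "XXIV"

def Spec_roman_numeral_reduction (str : String) (out : String) : Prop :=
  out = roman_numeral_reduction_alt str
instance (str : String) (out : String) : Decidable (Spec_roman_numeral_reduction str out) := by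
  unfold Spec_roman_numeral_reduction; infer_instance

-- ===== CLAIM (what is proved, stated in full; the proofs are below) =====
def Claim_equal_roman_numeral_reduction : Prop :=
  ∀ (str : String), Dom_roman_numeral_reduction str → Pre_roman_numeral_reduction str →
    Spec_roman_numeral_reduction str (roman_numeral_reduction str)

-- ===== LEMMAS AND PROOFS =====

-- literal item lists of the three dicts
lemma pvRomanA_mk : pvRomanA = PySem.Dict.mk
    [("I",1),("V",5),("X",10),("L",50),("C",100),("D",500),("M",1000),
     ("IV",4),("IX",9),("XL",40),("XC",90),("CD",400),("CM",900)] := by decide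

lemma pvPairsB_mk : pvPairsB = PySem.Dict.mk
    [("IV",4),("IX",9),("XL",40),("XC",90),("CD",400),("CM",900)] := by decide

lemma pvOnesB_mk : pvOnesB = PySem.Dict.mk
    [("I",1),("V",5),("X",10),("L",50),("C",100),("D",500),("M",1000)] := by decide

-- looking up a 2-character key in A's dict is a lookup in B's pair dict
lemma pvGet2_eq (a b : Char) :
    pvRomanA.get? (String.ofList [a, b]) = pvPairsB.get? (String.ofList [a, b]) := by
  rw [pvRomanA_mk, pvPairsB_mk]
  simp [PySem.Dict.get?_mk_cons, String.ext_iff]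

-- looking up a 1-character key in A's dict is a lookup in B's singles dict
lemma pvGet1_eq (a : Char) :
    pvRomanA.get? (String.ofList [a]) = pvOnesB.get? (String.ofList [a]) := by
  rw [pvRomanA_mk, pvOnesB_mk]
  simp [PySem.Dict.get?_mk_cons, String.ext_iff]

lemma pvParse_eq : ∀ (cs : List Char) (n : Int), pvParseA cs n = pvParseB cs n
  | [], _ => rfl
  | [c], n => by simp only [pvParseA, pvParseB, pvGet1_eq]
  | a :: b :: rest, n => by
    simp only [pvParseA, pvParseB, pvGet1_eq, pvGet2_eq]
    split
    · exact pvParse_eq rest _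
    · exact pvParse_eq (b :: rest) _

lemma pvPairVal_nonneg (a b : Char) : 0 ≤ (pvPairsB.get? (String.ofList [a, b])).getD 0 := by
  rw [pvPairsB_mk]
  simp only [PySem.Dict.get?_mk_cons]
  split_ifs <;> simp [PySem.Dict.get?]

lemma pvOneVal_nonneg (a : Char) : 0 ≤ (pvOnesB.get? (String.ofList [a])).getD 0 := by
  rw [pvOnesB_mk]
  simp only [PySem.Dict.get?_mk_cons]
  split_ifs <;> simp [PySem.Dict.get?]

lemma pvParse_nonneg : ∀ (cs : List Char) (n : Int), 0 ≤ n → 0 ≤ pvParseB cs n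
  | [], n, hn => hn
  | [c], n, hn => by
    simp only [pvParseB]
    have := pvOneVal_nonneg c; omega
  | a :: b :: rest, n, hn => by
    simp only [pvParseB]
    split
    · exact pvParse_nonneg rest _ (by have := pvPairVal_nonneg a b; omega)
    · exact pvParse_nonneg (b :: rest) _ (by have := pvOneVal_nonneg a; omega)

-- s repeated k times (the string A's inner loop appends)
def pvSRep (s : String) : Nat → String
  | 0 => ""
  | k + 1 => s ++ pvSRep s k

lemma pvInnerA_spec (s : String) (v : Int) :
    ∀ (k : Nat) (num : Int) (acc : String),
      pvInnerA s v k num acc = (num - k * v, acc ++ pvSRep s k) := by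
  intro k
  induction k with
  | zero => intro num acc; simp [pvInnerA, pvSRep]
  | succ k ih =>
    intro num acc
    simp only [pvInnerA, ih, pvSRep, Prod.mk.injEq]
    constructor
    · push_cast; ring
    · rw [← String.append_assoc]

lemma pvEncodeA_acc : ∀ (l : List (Int × String)) (num : Int) (acc : String),
    pvEncodeA l num acc = acc ++ pvEncodeA l num "" := by
  intro l
  induction l with
  | nil => intro num acc; simp [pvEncodeA]
  | cons hd tl ih =>
    intro num acc
    obtain ⟨v, s⟩ := hd
    simp only [pvEncodeA, pvInnerA_spec]
    split
    · rw [ih _ (acc ++ pvSRep s _), ih _ ("" ++ pvSRep s _)]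
      simp [String.append_assoc]
    · simp

lemma pvSRep_M (k : Nat) : pvSRep "M" k = String.ofList (List.replicate k 'M') := by
  induction k with
  | zero => rfl
  | succ k ih =>
    simp only [pvSRep, ih, List.replicate_succ]
    have : ("M" : String) = String.ofList ['M'] := rfl
    rw [this, ← String.ofList_append]
    rfl

-- the entries below 1000 reproduce the three digit tables, for every value < 1000
set_option maxHeartbeats 4000000 in
set_option maxRecDepth 100000 in
lemma pvTail_eq : ∀ (m : Fin 1000),
    pvEncodeA pvValSybA.tail (m.val : Int) "" =
      (pvHundredsB.getD (m.val / 100) "") ++ (pvTensB.getD (m.val / 10 % 10) "")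
        ++ (pvUnitsB.getD (m.val % 10) "") := by decide

lemma pvEncode_eq (n : Int) (hn : 0 ≤ n) :
    pvEncodeA pvValSybA n "" =
      pvMRep (PySem.Int.floordiv n 1000)
        ++ (pvHundredsB.getD (PySem.Int.mod (PySem.Int.floordiv n 100) 10).toNat "")
        ++ (pvTensB.getD (PySem.Int.mod (PySem.Int.floordiv n 10) 10).toNat "")
        ++ (pvUnitsB.getD (PySem.Int.mod n 10).toNat "") := by
  have e1000 : PySem.Int.floordiv n 1000 = n / 1000 := PySem.Int.floordiv_eq_ediv_of_pos (by norm_num)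
  have e100 : PySem.Int.floordiv n 100 = n / 100 := PySem.Int.floordiv_eq_ediv_of_pos (by norm_num)
  have e10 : PySem.Int.floordiv n 10 = n / 10 := PySem.Int.floordiv_eq_ediv_of_pos (by norm_num)
  have m10a : PySem.Int.mod (n / 100) 10 = (n / 100) % 10 := PySem.Int.mod_eq_emod_of_pos (by norm_num)
  have m10b : PySem.Int.mod (n / 10) 10 = (n / 10) % 10 := PySem.Int.mod_eq_emod_of_pos (by norm_num)
  have m10c : PySem.Int.mod n 10 = n % 10 := PySem.Int.mod_eq_emod_of_pos (by norm_num)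
  by_cases h : 0 < n
  · -- one step of the outer while: the M phase
    rw [show pvValSybA = (1000, "M") :: pvValSybA.tail from rfl]
    simp only [pvEncodeA, pvInnerA_spec, if_pos h]
    have hk : ((PySem.Int.floordiv n 1000).toNat : Int) = n / 1000 := by
      rw [e1000]; exact Int.toNat_of_nonneg (Int.ediv_nonneg hn (by norm_num))
    rw [pvEncodeA_acc]
    -- remaining value is n % 1000
    have hrem : n - ((PySem.Int.floordiv n 1000).toNat : Int) * 1000 = n % 1000 := by
      rw [hk]; omega
    rw [hrem]
    -- tail = digit tables at m := (n % 1000).toNat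
    have hmlt : (n % 1000).toNat < 1000 := by omega
    have hmc : (((n % 1000).toNat : Nat) : Int) = n % 1000 := Int.toNat_of_nonneg (by omega)
    have htail := pvTail_eq ⟨(n % 1000).toNat, hmlt⟩
    simp only [hmc] at htail
    rw [htail]
    -- M part
    have hM : pvSRep "M" (PySem.Int.floordiv n 1000).toNat = pvMRep (PySem.Int.floordiv n 1000) := by
      rw [pvSRep_M, pvMRep, PySem.List.pyRepeat_singleton]
    -- digit indices agree
    have h1 : (n % 1000).toNat / 100 = (PySem.Int.mod (PySem.Int.floordiv n 100) 10).toNat := by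
      rw [e100, m10a]; omega
    have h2 : (n % 1000).toNat / 10 % 10 = (PySem.Int.mod (PySem.Int.floordiv n 10) 10).toNat := by
      rw [e10, m10b]; omega
    have h3 : (n % 1000).toNat % 10 = (PySem.Int.mod n 10).toNat := by
      rw [m10c]; omega
    rw [hM, h1, h2, h3]
    simp [String.append_assoc]
  · have hn0 : n = 0 := by omega
    subst hn0
    decide

-- ===== VERDICT (by name: the statement is the Claim_ definition above) =====
theorem roman_numeral_reduction_spec : Claim_equal_roman_numeral_reduction := by
  intro s _ _
  unfold Spec_roman_numeral_reduction roman_numeral_reduction roman_numeral_reduction_alt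
  rw [pvParse_eq]
  exact pvEncode_eq _ (pvParse_nonneg _ 0 le_rfl)
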